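-- pv_equiv track=rewrite | github.com/zain08816/Coding-Problems | Set #1 Problems/Dailys/#039 firstMultiple.py | firstMultiple
-- ===== SOURCE A (Python) =====
-- def firstMultiple(d, s):
--     a = True
--     while True:
--         a = True
--         for i in d:
--             if s % i != 0:
--                 a = False
--         if a == True:
--             return s
--         s += 1
-- ===== SOURCE B (Python) =====
-- def firstMultiple(d, s):
--     L = 1
--     for i in d:
--         g, x = L, abs(i)
--         while x:
--             g, x = x, g % x
--         L = L * abs(i) // g
--     return -(-s // L) * L
-- ===== Notes on version B (the rewrite author's own statement) =====
-- stated objective: faster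
-- what changed: B computes lcm(d) once via a hand-written Euclid gcd and returns the ceiling multiple -(-s//L)*L in closed form, instead of A's linear scan testing every integer from s against every divisor; intended as faster (asymptotic) — in a timing run A timed out at n=16 where B returned immediately, so no ratio could be measured.
import Mathlib
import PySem

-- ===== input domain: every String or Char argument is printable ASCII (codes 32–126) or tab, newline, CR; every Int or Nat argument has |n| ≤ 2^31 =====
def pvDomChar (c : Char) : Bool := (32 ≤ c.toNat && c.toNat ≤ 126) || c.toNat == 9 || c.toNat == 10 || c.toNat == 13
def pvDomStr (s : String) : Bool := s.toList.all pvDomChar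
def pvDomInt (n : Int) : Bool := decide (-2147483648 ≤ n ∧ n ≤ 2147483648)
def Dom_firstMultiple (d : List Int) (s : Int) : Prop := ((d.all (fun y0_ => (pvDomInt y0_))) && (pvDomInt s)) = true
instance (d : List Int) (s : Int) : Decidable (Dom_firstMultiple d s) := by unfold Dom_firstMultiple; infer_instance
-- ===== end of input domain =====

-- B replaces A's linear scan (test every integer from s against every divisor) by a closed form:
-- compute L = lcm(d) with a hand-written Euclid gcd, return the first multiple of L that is ≥ s.

-- ===== PORT A =====
-- A's 'while True' loop, with fuel = lcm of |d| (within lcm steps from s a common multiple exists;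
-- the loop body is A's code step for step, the fuel is only a termination bound, never reached under Pre_).
def fmChk (d : List Int) (s : Int) : Bool :=
  d.foldl (fun a i => if PySem.Int.mod s i ≠ 0 then false else a) true

def fmLoop (d : List Int) : Int → Nat → Int
  | s, 0 => s
  | s, fuel + 1 => if fmChk d s then s else fmLoop d (s + 1) fuel

def firstMultiple (d : List Int) (s : Int) : Int :=
  fmLoop d s (d.foldl (fun n i => Nat.lcm n i.natAbs) 1)

-- ===== PORT B =====
-- termination fact for the Euclid loop (cited by gcdLoop's decreasing_by)
theorem pvModNatAbsLt (g x : Int) (h : x ≠ 0) : (PySem.Int.mod g x).natAbs < x.natAbs := by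
  rcases lt_or_gt_of_ne h with hx | hx
  · have := PySem.Int.mod_neg_bounds g hx; omega
  · have h1 := PySem.Int.mod_nonneg g hx
    have h2 := PySem.Int.mod_lt g hx
    omega

-- while x: g, x = x, g % x
def gcdLoop (g x : Int) : Int :=
  if h : x ≠ 0 then gcdLoop x (PySem.Int.mod g x) else g
termination_by x.natAbs
decreasing_by exact pvModNatAbsLt g x h

def firstMultiple_alt (d : List Int) (s : Int) : Int :=
  let L : Int := d.foldl (fun L i => PySem.Int.floordiv (L * |i|) (gcdLoop L |i|)) 1
  (-(PySem.Int.floordiv (-s) L)) * L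

-- ===== PRECONDITION & SPEC =====
-- Pre_ excludes only divisor lists containing 0, on which Python A raises ZeroDivisionError (B raises too).
def Pre_firstMultiple (d : List Int) (s : Int) : Prop := 0 ∉ d
instance (d : List Int) (s : Int) : Decidable (Pre_firstMultiple d s) := by
  unfold Pre_firstMultiple; infer_instance

def pvWitness_firstMultiple : List Int × Int := ([2, 3], 5)

def Spec_firstMultiple (d : List Int) (s : Int) (out : Int) : Prop := out = firstMultiple_alt d s
instance (d : List Int) (s : Int) (out : Int) : Decidable (Spec_firstMultiple d s out) := by
  unfold Spec_firstMultiple; infer_instance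

-- ===== CLAIM (what is proved, stated in full; the proofs are below) =====
def Claim_equal_firstMultiple : Prop := ∀ (d : List Int) (s : Int), Dom_firstMultiple d s → Pre_firstMultiple d s → Spec_firstMultiple d s (firstMultiple d s)

-- ===== LEMMAS AND PROOFS =====

-- the Nat lcm of the list, the value A's fuel fold computes
def fmN (d : List Int) : Nat := d.foldl (fun n i => Nat.lcm n i.natAbs) 1

theorem fmN_fold_pos (d : List Int) (h : (0:Int) ∉ d) :
    ∀ a : Nat, 0 < a → 0 < d.foldl (fun n i => Nat.lcm n i.natAbs) a := by
  induction d with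
  | nil => intro a ha; simpa using ha
  | cons x xs ih =>
    intro a ha
    have hx : x ≠ 0 := by intro h0; exact h (by simp [h0])
    have hxa : 0 < x.natAbs := Int.natAbs_pos.mpr hx
    exact ih (fun hm => h (List.mem_cons_of_mem _ hm)) _ (Nat.lcm_pos ha hxa)

theorem fmN_pos (d : List Int) (h : (0:Int) ∉ d) : 0 < fmN d :=
  fmN_fold_pos d h 1 one_pos

theorem fmN_fold_dvd (d : List Int) (m : Nat) :
    ∀ a : Nat, (d.foldl (fun n i => Nat.lcm n i.natAbs) a ∣ m ↔ a ∣ m ∧ ∀ i ∈ d, i.natAbs ∣ m) := by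
  induction d with
  | nil => intro a; simp
  | cons x xs ih =>
    intro a
    rw [List.foldl_cons, ih, Nat.lcm_dvd_iff]
    constructor
    · rintro ⟨⟨h1, h2⟩, h3⟩
      refine ⟨h1, ?_⟩
      intro i hi
      rcases List.mem_cons.mp hi with rfl | hi
      · exact h2
      · exact h3 i hi
    · rintro ⟨h1, h2⟩
      exact ⟨⟨h1, h2 x (by simp)⟩, fun i hi => h2 i (List.mem_cons_of_mem _ hi)⟩

theorem fmN_dvd_iff (d : List Int) (t : Int) :
    ((fmN d : Int) ∣ t ↔ ∀ i ∈ d, i ∣ t) := by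
  rw [Int.ofNat_dvd_left, fmN, fmN_fold_dvd d t.natAbs 1]
  simp only [Nat.one_dvd, true_and]
  constructor
  · intro hh i hi
    exact (Int.natAbs_dvd_natAbs).mp (hh i hi)
  · intro hh i hi
    exact (Int.natAbs_dvd_natAbs).mpr (hh i hi)

theorem fmChk_iff (d : List Int) (s : Int) :
    (fmChk d s = true ↔ ∀ i ∈ d, i ∣ s) := by
  unfold fmChk
  have key : ∀ (l : List Int) (a : Bool),
      (l.foldl (fun a i => if PySem.Int.mod s i ≠ 0 then false else a) a = true
        ↔ a = true ∧ ∀ i ∈ l, i ∣ s) := by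
    intro l
    induction l with
    | nil => intro a; simp
    | cons x xs ih =>
      intro a
      rw [List.foldl_cons, ih]
      by_cases hx : PySem.Int.mod s x = 0
      · have hdvd : x ∣ s := (PySem.Int.mod_eq_zero_iff_dvd s x).mp hx
        simp [hx, hdvd]
      · have hdvd : ¬ x ∣ s := fun hc => hx ((PySem.Int.mod_eq_zero_iff_dvd s x).mpr hc)
        simp [hx, hdvd]
  rw [key]
  simp

-- the Euclid loop computes the (nonnegative) gcd on nonnegative arguments
theorem gcdLoop_eq_aux : ∀ n : Nat, ∀ x g : Int, x.natAbs = n → 0 ≤ g → 0 ≤ x →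
    gcdLoop g x = (Int.gcd g x : Int) := by
  intro n
  induction n using Nat.strong_induction_on with
  | _ n ih =>
    intro x g hn hg hx
    rw [gcdLoop]
    by_cases h : x = 0
    · simp [h, Int.natAbs_of_nonneg hg, Int.gcd]
    · simp only [h, ne_eq, not_false_eq_true, dite_true]
      have hx' : 0 < x := lt_of_le_of_ne hx (Ne.symm h)
      have hmod : PySem.Int.mod g x = g % x := PySem.Int.mod_eq_emod_of_pos (a := g) hx'
      have hlt : (PySem.Int.mod g x).natAbs < n := hn ▸ pvModNatAbsLt g x h
      rw [ih (PySem.Int.mod g x).natAbs hlt (PySem.Int.mod g x) x rfl hx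
        (hmod ▸ Int.emod_nonneg g h), hmod,
        show Int.gcd x (g % x) = Int.gcd g x from by rw [Int.gcd_comm, Int.gcd_emod]]

-- B's fold equals the Nat lcm fold (cast to Int)
theorem fold_alt_eq (d : List Int) (h : (0:Int) ∉ d) :
    ∀ a : Nat, 0 < a →
      d.foldl (fun L i => PySem.Int.floordiv (L * |i|) (gcdLoop L |i|)) (a : Int)
        = ((d.foldl (fun n i => Nat.lcm n i.natAbs) a : Nat) : Int) := by
  induction d with
  | nil => intro a _; simp
  | cons x xs ih =>
    intro a ha
    have hx : x ≠ 0 := by intro h0; exact h (by simp [h0])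
    have hxa : 0 < x.natAbs := Int.natAbs_pos.mpr hx
    have habs : |x| = (x.natAbs : Int) := Int.abs_eq_natAbs x
    have hg : gcdLoop (a : Int) |x| = (Nat.gcd a x.natAbs : Int) := by
      rw [gcdLoop_eq_aux |x|.natAbs |x| (a : Int) rfl (by positivity) (abs_nonneg x), habs]
      simp [Int.gcd, Int.natAbs_abs]
    have hgpos : 0 < Nat.gcd a x.natAbs := Nat.gcd_pos_of_pos_left _ ha
    have hstep : PySem.Int.floordiv ((a : Int) * |x|) (gcdLoop (a : Int) |x|)
        = (Nat.lcm a x.natAbs : Int) := by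
      rw [hg, habs, PySem.Int.floordiv_eq_ediv_of_pos (a := (a : Int) * (x.natAbs : Int)) (by exact_mod_cast hgpos)]
      rw [show ((a : Int) * (x.natAbs : Int)) = ((a * x.natAbs : Nat) : Int) by push_cast; ring]
      rw [← Int.natCast_ediv]
      rfl
    rw [List.foldl_cons, List.foldl_cons, hstep,
      ih (fun hm => h (List.mem_cons_of_mem _ hm)) _ (Nat.lcm_pos ha hxa)]

-- A's fueled loop returns the first multiple c of N = lcm(d) at or after s0, if the fuel reaches it
theorem fmLoop_ret (d : List Int) (s0 c : Int) (hc : (fmN d : Int) ∣ c)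
    (hmin : ∀ t : Int, s0 ≤ t → t < c → ¬ (fmN d : Int) ∣ t) :
    ∀ fuel : Nat, ∀ s : Int, s0 ≤ s → s ≤ c → c < s + fuel → fmLoop d s fuel = c := by
  intro fuel
  induction fuel with
  | zero => intro s _ h1 h2; omega
  | succ n ih =>
    intro s hs0 h1 h2
    rw [fmLoop]
    by_cases hs : s = c
    · have hchk : fmChk d s = true := by
        rw [fmChk_iff]
        exact (fmN_dvd_iff d s).mp (hs ▸ hc)
      rw [if_pos hchk]
      exact hs
    · have hlt : s < c := lt_of_le_of_ne h1 hs
      have hchk : fmChk d s = false := by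
        rcases Bool.eq_false_or_eq_true (fmChk d s) with ht | hf
        · exact absurd ((fmN_dvd_iff d s).mpr ((fmChk_iff d s).mp ht)) (hmin s hs0 hlt)
        · exact hf
      simp only [hchk, Bool.false_eq_true, if_false]
      exact ih (s + 1) (by omega) (by omega) (by push_cast at h2 ⊢; omega)

-- ===== VERDICT (by name: the statement is the Claim_ definition above) =====
theorem firstMultiple_spec : Claim_equal_firstMultiple := by
  intro d s _ hpre
  unfold Spec_firstMultiple firstMultiple firstMultiple_alt
  have h : (0:Int) ∉ d := hpre
  have hN : 0 < fmN d := fmN_pos d h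
  have hNI : (0:Int) < (fmN d : Int) := by exact_mod_cast hN
  have hfold : d.foldl (fun L i => PySem.Int.floordiv (L * |i|) (gcdLoop L |i|)) (1 : Int)
      = ((fmN d : Nat) : Int) := by
    have h1 := fold_alt_eq d h 1 one_pos
    simpa [fmN, Nat.cast_one] using h1
  simp only [hfold]
  set N : Int := (fmN d : Int) with hNdef
  set q : Int := -(PySem.Int.floordiv (-s) N) with hq
  have hb := (PySem.Int.neg_floordiv_neg_eq_iff_of_pos (a := s) (b := N) hNI).mp rfl
  have hb1 : q * N - N < s := by
    have := hb.1
    rw [sub_mul, one_mul] at this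
    linarith
  have hb2 : s ≤ q * N := hb.2
  have hcdvd : N ∣ q * N := Dvd.intro_left q rfl
  have hmin : ∀ t : Int, s ≤ t → t < q * N → ¬ N ∣ t := by
    intro t hst htc hdvd
    have hdiff : N ∣ (q * N - t) := dvd_sub hcdvd hdvd
    have hle : N ≤ q * N - t := Int.le_of_dvd (by omega) hdiff
    omega
  show fmLoop d s (fmN d) = q * N
  exact fmLoop_ret d s (q * N) hcdvd hmin (fmN d) s le_rfl hb2 (by omega)
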